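-- pv_equiv track=rewrite | github.com/security-privacy-lab/online-anomaly-detection | WUIL/injection_original_keep.py | get_quartile_groups
-- ===== SOURCE A (Python) =====
-- def get_quartile_groups(indices, total_len):
--     quartiles = {
--         '0-25%': [],
--         '25-50%': [],
--         '50-75%': [],
--         '75-100%': []
--     }
--     for idx in indices:
--         pct = (idx / total_len) * 100
--         if pct <= 25:
--             quartiles['0-25%'].append(idx)
--         elif pct <= 50:
--             quartiles['25-50%'].append(idx)
--         elif pct <= 75:
--             quartiles['50-75%'].append(idx)
--         else:
--             quartiles['75-100%'].append(idx)
--     return quartiles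
-- ===== SOURCE B (Python) =====
-- def get_quartile_groups(indices, total_len):
--     xs = list(indices)  # materialize so all four passes see the same items
--     pct = lambda i: (i / total_len) * 100
--     return {
--         '0-25%':   [i for i in xs if pct(i) <= 25],
--         '25-50%':  [i for i in xs if 25 < pct(i) <= 50],
--         '50-75%':  [i for i in xs if 50 < pct(i) <= 75],
--         '75-100%': [i for i in xs if pct(i) > 75],
--     }
-- ===== Notes on version B (the rewrite author's own statement) =====
-- stated objective: simpler
-- what changed: Replaces the single bucketing loop with an if/elif branch chain by building the result dict directly as four independent filtering comprehensions, one per quartile range.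
import Mathlib
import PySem

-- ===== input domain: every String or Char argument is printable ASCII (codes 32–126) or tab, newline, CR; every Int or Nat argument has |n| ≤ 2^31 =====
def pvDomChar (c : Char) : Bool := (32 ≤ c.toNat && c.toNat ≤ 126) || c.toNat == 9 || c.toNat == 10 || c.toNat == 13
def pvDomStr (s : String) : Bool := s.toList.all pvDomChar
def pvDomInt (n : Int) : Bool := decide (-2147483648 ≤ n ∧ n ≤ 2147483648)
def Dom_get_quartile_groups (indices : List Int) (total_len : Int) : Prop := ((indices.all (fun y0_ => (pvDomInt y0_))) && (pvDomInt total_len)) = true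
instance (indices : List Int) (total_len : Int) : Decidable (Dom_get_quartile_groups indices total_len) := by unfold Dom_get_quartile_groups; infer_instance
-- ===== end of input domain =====

-- B replaces A's single bucketing loop (if/elif chain) by four independent filtering
-- passes building the dict directly; same values, same cost (objective: simpler).
-- Both ports evaluate the Python float expression (idx / total_len) * 100 in ℚ; this is
-- exact on Dom (|idx|,|total_len| ≤ 2^31): near the boundaries 25/50/75 the float error
-- (≈2^-46 absolute) is far below the minimal rational gap (≥ 100/2^33), and exact-boundary
-- ratios 1/4, 1/2, 3/4 are exactly representable, so every comparison agrees with ℚ.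

-- ===== PORT A =====
def get_quartile_groups (indices : List Int) (total_len : Int) : List (String × List Int) :=
  let st := indices.foldl
    (fun (q : List Int × List Int × List Int × List Int) (idx : Int) =>
      let pct : ℚ := ((idx : ℚ) / (total_len : ℚ)) * 100
      if pct ≤ 25 then (q.1 ++ ([idx] : List Int), q.2.1, q.2.2.1, q.2.2.2)
      else if pct ≤ 50 then (q.1, q.2.1 ++ ([idx] : List Int), q.2.2.1, q.2.2.2)
      else if pct ≤ 75 then (q.1, q.2.1, q.2.2.1 ++ ([idx] : List Int), q.2.2.2)
      else (q.1, q.2.1, q.2.2.1, q.2.2.2 ++ ([idx] : List Int)))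
    ([], [], [], [])
  [("0-25%", st.1), ("25-50%", st.2.1), ("50-75%", st.2.2.1), ("75-100%", st.2.2.2)]

-- ===== PORT B =====
def get_quartile_groups_alt (indices : List Int) (total_len : Int) : List (String × List Int) :=
  let pct : Int → ℚ := fun i => ((i : ℚ) / (total_len : ℚ)) * 100
  [("0-25%",   indices.filter (fun (i : Int) => decide (pct i ≤ 25))),
   ("25-50%",  indices.filter (fun (i : Int) => decide (25 < pct i ∧ pct i ≤ 50))),
   ("50-75%",  indices.filter (fun (i : Int) => decide (50 < pct i ∧ pct i ≤ 75))),
   ("75-100%", indices.filter (fun (i : Int) => decide (75 < pct i)))]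

-- ===== PRECONDITION & SPEC =====
-- Pre_ excludes exactly the inputs where Python A raises ZeroDivisionError:
-- a nonempty indices list with total_len == 0 (B raises there too).
def Pre_get_quartile_groups (indices : List Int) (total_len : Int) : Prop :=
  indices = [] ∨ total_len ≠ 0
instance (indices : List Int) (total_len : Int) : Decidable (Pre_get_quartile_groups indices total_len) := by unfold Pre_get_quartile_groups; infer_instance
def pvWitness_get_quartile_groups : List Int × Int := ([1, 3, 7, 10], 10)

def Spec_get_quartile_groups (indices : List Int) (total_len : Int) (out : List (String × List Int)) : Prop := out = get_quartile_groups_alt indices total_len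
instance (indices : List Int) (total_len : Int) (out : List (String × List Int)) : Decidable (Spec_get_quartile_groups indices total_len out) := by unfold Spec_get_quartile_groups; infer_instance

-- ===== CLAIM (what is proved, stated in full; the proofs are below) =====
def Claim_equal_get_quartile_groups : Prop := ∀ (indices : List Int) (total_len : Int), Dom_get_quartile_groups indices total_len → Pre_get_quartile_groups indices total_len → Spec_get_quartile_groups indices total_len (get_quartile_groups indices total_len)

-- ===== LEMMAS AND PROOFS =====

-- A's fold, started from arbitrary accumulators, appends exactly B's four filters.
theorem gq_fold_filter (total_len : Int) (l : List Int)
    (a b c d : List Int) :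
    l.foldl
      (fun (q : List Int × List Int × List Int × List Int) (idx : Int) =>
        let pct : ℚ := ((idx : ℚ) / (total_len : ℚ)) * 100
        if pct ≤ 25 then (q.1 ++ ([idx] : List Int), q.2.1, q.2.2.1, q.2.2.2)
        else if pct ≤ 50 then (q.1, q.2.1 ++ ([idx] : List Int), q.2.2.1, q.2.2.2)
        else if pct ≤ 75 then (q.1, q.2.1, q.2.2.1 ++ ([idx] : List Int), q.2.2.2)
        else (q.1, q.2.1, q.2.2.1, q.2.2.2 ++ ([idx] : List Int)))
      (a, b, c, d)
    = (a ++ l.filter (fun (i : Int) => decide (((i : ℚ) / (total_len : ℚ)) * 100 ≤ 25)),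
       b ++ l.filter (fun (i : Int) => decide (25 < ((i : ℚ) / (total_len : ℚ)) * 100 ∧ ((i : ℚ) / (total_len : ℚ)) * 100 ≤ 50)),
       c ++ l.filter (fun (i : Int) => decide (50 < ((i : ℚ) / (total_len : ℚ)) * 100 ∧ ((i : ℚ) / (total_len : ℚ)) * 100 ≤ 75)),
       d ++ l.filter (fun (i : Int) => decide (75 < ((i : ℚ) / (total_len : ℚ)) * 100))) := by
  induction l generalizing a b c d with
  | nil => simp
  | cons x xs ih =>
    simp only [List.foldl_cons, List.filter_cons]
    set p : ℚ := ((x : ℚ) / (total_len : ℚ)) * 100 with hp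
    by_cases h1 : p ≤ 25
    · rw [if_pos h1, ih]
      have h50 : p ≤ 50 := by linarith
      have h75 : p ≤ 75 := by linarith
      simp [h1, h50, h75, not_lt.mpr h1]
    · rw [if_neg h1]
      by_cases h2 : p ≤ 50
      · rw [if_pos h2, ih]
        have h75 : p ≤ 75 := by linarith
        simp [h1, h2, h75, not_le.mp h1, not_lt.mpr h2]
      · rw [if_neg h2]
        by_cases h3 : p ≤ 75
        · rw [if_pos h3, ih]
          simp [h1, h2, h3, not_le.mp h2, not_lt.mpr h3]
        · rw [if_neg h3, ih]
          simp [h1, h2, h3, not_le.mp h3]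

-- ===== VERDICT (by name: the statement is the Claim_ definition above) =====
theorem get_quartile_groups_spec : Claim_equal_get_quartile_groups := by
  intro indices total_len _ _
  unfold Spec_get_quartile_groups get_quartile_groups get_quartile_groups_alt
  rw [gq_fold_filter]
  simp
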